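-- pv_equiv track=rewrite | github.com/daniel-reich/turbo-robot | sARz4TDdxCuqK6pja_2.py | deadly_virus
-- ===== SOURCE A (Python) =====
-- def deadly_virus(grid, n):
--     v_set, rows, cols = set(), len(grid), len(grid[0])
--     for r, row in enumerate(grid):
--         for c, v in enumerate(row):
--             if v == "V":
--                 v_set.add((r, c))
--     for _ in range(n):
--         new_set = set()
--         for p in v_set:
--             for i, j in [(1, 0), (-1, 0), (0, 1), (0, -1)]:
--                 r = p[0] + i
--                 c = p[1] + j
--                 if -1 < r < rows and -1 < c < cols:
--                     new_set.add((r, c))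
--         v_set.update(new_set)
--     res = [["P"] * cols for _ in range(rows)]
--     for r, c in v_set:
--         res[r][c] = "V"
--     return res
-- ===== SOURCE B (Python) =====
-- def deadly_virus(grid, n):
--     # Closed-form: a cell is infected iff its Manhattan distance to some
--     # initial "V" is at most n (the grid is a rectangle, so every such cell
--     # is reached in exactly that many steps).
--     rows, cols = len(grid), len(grid[0])
--     sources = [(r, c) for r, row in enumerate(grid)
--                for c, v in enumerate(row) if v == "V"]
--     m = max(n, 0)
--     return [["V" if any(abs(r - sr) + abs(c - sc) <= m for sr, sc in sources)
--              else "P" for c in range(cols)] for r in range(rows)]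
-- ===== Notes on version B (the rewrite author's own statement) =====
-- stated objective: alternative
-- what changed: B replaces the n-round frontier simulation with a closed-form test: a cell is infected iff its Manhattan distance to some initial 'V' is at most max(n,0); cost no longer depends on n but scans the source list per cell.
import Mathlib
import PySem

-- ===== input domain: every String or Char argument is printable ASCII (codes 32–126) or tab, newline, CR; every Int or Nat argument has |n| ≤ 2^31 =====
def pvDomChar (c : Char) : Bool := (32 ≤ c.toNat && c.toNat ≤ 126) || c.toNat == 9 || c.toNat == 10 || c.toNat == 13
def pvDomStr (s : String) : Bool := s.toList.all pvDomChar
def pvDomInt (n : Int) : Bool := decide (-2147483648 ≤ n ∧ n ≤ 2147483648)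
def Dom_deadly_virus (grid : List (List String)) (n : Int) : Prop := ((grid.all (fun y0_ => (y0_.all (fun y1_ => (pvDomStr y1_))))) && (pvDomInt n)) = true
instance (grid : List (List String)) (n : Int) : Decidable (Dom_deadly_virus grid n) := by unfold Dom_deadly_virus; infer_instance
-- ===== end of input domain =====

-- B computes each cell from the Manhattan distance to the nearest initial "V"
-- (closed form instead of simulating n spreading rounds); objective: alternative.

-- ===== PORT A =====
-- literal transliteration of A; grid[0] is fetched with a default only because
-- Pre_ excludes the empty grid (where Python A raises IndexError), and the
-- res[r][c] = "V" writes use the total pySetD forms, exact under Pre_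
-- (all written indices are then in range).
def deadly_virus (grid : List (List String)) (n : Int) : List (List String) :=
  let rows : Int := grid.length
  let cols : Int := (PySem.List.pyGetD grid 0 []).length
  let v0 : PySem.Set (Int × Int) :=
    (PySem.List.enumerate grid 0).foldl (fun s rr =>
      (PySem.List.enumerate rr.2 0).foldl (fun s cv =>
        if cv.2 = "V" then PySem.Set.add s (rr.1, cv.1) else s) s) PySem.Set.empty
  let vfinal : PySem.Set (Int × Int) :=
    (PySem.List.pyRange 0 n 1).foldl (fun vs _ =>
      let news : PySem.Set (Int × Int) :=
        vs.foldl (fun ns p =>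
          [((1:Int),(0:Int)), (-1,0), (0,1), (0,-1)].foldl (fun ns d =>
            let r := p.1 + d.1
            let c := p.2 + d.2
            if -1 < r ∧ r < rows ∧ -1 < c ∧ c < cols then PySem.Set.add ns (r, c) else ns) ns)
          PySem.Set.empty
      PySem.Set.update vs news) v0
  let res : List (List String) := List.replicate rows.toNat (List.replicate cols.toNat "P")
  vfinal.foldl (fun res p =>
    PySem.List.pySetD res p.1 (PySem.List.pySetD (PySem.List.pyGetD res p.1 []) p.2 "V")) res

-- ===== PORT B =====
-- [(r, c) for r, row in enumerate(grid) for c, v in enumerate(row) if v == "V"]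
def pvSources (grid : List (List String)) : List (Int × Int) :=
  (PySem.List.enumerate grid 0).flatMap (fun rr =>
    ((PySem.List.enumerate rr.2 0).filter (fun cv => cv.2 == "V")).map (fun cv => (rr.1, cv.1)))

def deadly_virus_alt (grid : List (List String)) (n : Int) : List (List String) :=
  let rows : Int := grid.length
  let cols : Int := (PySem.List.pyGetD grid 0 []).length   -- grid[0]; Pre_ excludes the empty grid
  let sources := pvSources grid
  let m : Int := max n 0
  (PySem.List.pyRange 0 rows 1).map (fun r =>
    (PySem.List.pyRange 0 cols 1).map (fun c =>
      if sources.any (fun s => decide (|r - s.1| + |c - s.2| ≤ m)) then "V" else "P"))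

-- ===== PRECONDITION & SPEC =====
-- Pre_ excludes exactly the inputs on which Python A raises: the empty grid
-- (IndexError on grid[0]) and grids with a "V" at a column index ≥ len(grid[0])
-- (IndexError on res[r][c] = "V").
def Pre_deadly_virus (grid : List (List String)) (n : Int) : Prop :=
  grid ≠ [] ∧ ∀ row ∈ grid, ∀ cv ∈ PySem.List.enumerate row 0,
    cv.2 = "V" → cv.1 < ((grid.headD []).length : Int)
instance (grid : List (List String)) (n : Int) : Decidable (Pre_deadly_virus grid n) := by
  unfold Pre_deadly_virus; infer_instance

def pvWitness_deadly_virus : List (List String) × Int := ([["P", "V"], ["P", "P"]], 1)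

def Spec_deadly_virus (grid : List (List String)) (n : Int) (out : List (List String)) : Prop := out = deadly_virus_alt grid n
instance (grid : List (List String)) (n : Int) (out : List (List String)) : Decidable (Spec_deadly_virus grid n out) := by unfold Spec_deadly_virus; infer_instance

-- ===== CLAIM (what is proved, stated in full; the proofs are below) =====
def Claim_equal_deadly_virus : Prop := ∀ (grid : List (List String)) (n : Int), Dom_deadly_virus grid n → Pre_deadly_virus grid n → Spec_deadly_virus grid n (deadly_virus grid n)

-- ===== LEMMAS AND PROOFS =====

-- Proof-side abbreviations for the pieces of port A --------------------------

def pvDeltas : List (Int × Int) := [(1,0), (-1,0), (0,1), (0,-1)]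

def pvV0 (grid : List (List String)) : PySem.Set (Int × Int) :=
  (PySem.List.enumerate grid 0).foldl (fun s rr =>
    (PySem.List.enumerate rr.2 0).foldl (fun s cv =>
      if cv.2 = "V" then PySem.Set.add s (rr.1, cv.1) else s) s) PySem.Set.empty

def pvStep (rows cols : Int) (vs : PySem.Set (Int × Int)) : PySem.Set (Int × Int) :=
  let news : PySem.Set (Int × Int) :=
    vs.foldl (fun ns p =>
      [((1:Int),(0:Int)), (-1,0), (0,1), (0,-1)].foldl (fun ns d =>
        let r := p.1 + d.1
        let c := p.2 + d.2
        if -1 < r ∧ r < rows ∧ -1 < c ∧ c < cols then PySem.Set.add ns (r, c) else ns) ns)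
      PySem.Set.empty
  PySem.Set.update vs news

def pvWrite (res : List (List String)) (p : Int × Int) : List (List String) :=
  PySem.List.pySetD res p.1 (PySem.List.pySetD (PySem.List.pyGetD res p.1 []) p.2 "V")

abbrev pvInB (rows cols : Int) (p : Int × Int) : Prop :=
  -1 < p.1 ∧ p.1 < rows ∧ -1 < p.2 ∧ p.2 < cols

def pvDist (p q : Int × Int) : Int := ((p.1 - q.1).natAbs : Int) + ((p.2 - q.2).natAbs : Int)

def pvCellD (res : List (List String)) (r c : Nat) : String := (res.getD r []).getD c ""

-- Generic membership through a foldl that only adds elements -----------------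

theorem pv_mem_foldl {b : Type} (l : List b) (upd : PySem.Set (Int × Int) → b → PySem.Set (Int × Int))
    (Q : b → (Int × Int) → Prop)
    (h : ∀ s x p, p ∈ upd s x ↔ p ∈ s ∨ Q x p) (s : PySem.Set (Int × Int)) (p : Int × Int) :
    p ∈ l.foldl upd s ↔ p ∈ s ∨ ∃ x ∈ l, Q x p := by
  induction l generalizing s with
  | nil => simp
  | cons a l ih =>
    rw [List.foldl_cons, ih, h]
    constructor
    · rintro ((hs | hq) | ⟨x, hx, hq⟩)
      · exact .inl hs
      · exact .inr ⟨a, by simp, hq⟩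
      · exact .inr ⟨x, by simp [hx], hq⟩
    · rintro (hs | ⟨x, hx, hq⟩)
      · exact .inl (.inl hs)
      · rcases List.mem_cons.mp hx with rfl | hx
        · exact .inl (.inr hq)
        · exact .inr ⟨x, hx, hq⟩

theorem pv_mem_add_if (c : Prop) [Decidable c] (s : PySem.Set (Int × Int)) (q p : Int × Int) :
    p ∈ (if c then PySem.Set.add s q else s) ↔ p ∈ s ∨ (c ∧ p = q) := by
  split_ifs with hc <;> simp [PySem.Set.mem_add, hc]

-- Membership in the initial virus set ---------------------------------------

theorem pv_mem_sources (grid : List (List String)) (p : Int × Int) :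
    p ∈ pvSources grid ↔ ∃ rr ∈ PySem.List.enumerate grid 0,
      ∃ cv ∈ PySem.List.enumerate rr.2 0, cv.2 = "V" ∧ p = (rr.1, cv.1) := by
  simp only [pvSources, List.mem_flatMap, List.mem_map, List.mem_filter, beq_iff_eq]
  constructor
  · rintro ⟨rr, hrr, cv, ⟨hcv, hV⟩, rfl⟩
    exact ⟨rr, hrr, cv, hcv, hV, rfl⟩
  · rintro ⟨rr, hrr, cv, hcv, hV, rfl⟩
    exact ⟨rr, hrr, cv, ⟨hcv, hV⟩, rfl⟩

theorem pv_mem_v0 (grid : List (List String)) (p : Int × Int) :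
    p ∈ pvV0 grid ↔ p ∈ pvSources grid := by
  rw [pvV0, pv_mem_foldl _ _
      (fun (rr : Int × List String) (p : Int × Int) =>
        ∃ cv ∈ PySem.List.enumerate rr.2 0, cv.2 = "V" ∧ p = (rr.1, cv.1))
      (fun s rr p => pv_mem_foldl _ _
        (fun (cv : Int × String) (p : Int × Int) => cv.2 = "V" ∧ p = (rr.1, cv.1))
        (fun s cv p => pv_mem_add_if _ _ _ _) s p),
    pv_mem_sources]
  simp [PySem.Set.empty]

-- Membership through one simulation step ------------------------------------

theorem pv_mem_step (rows cols : Int) (vs : PySem.Set (Int × Int)) (p : Int × Int) :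
    p ∈ pvStep rows cols vs ↔ p ∈ vs ∨ ∃ q ∈ vs, ∃ d ∈ pvDeltas,
      pvInB rows cols (q.1 + d.1, q.2 + d.2) ∧ p = (q.1 + d.1, q.2 + d.2) := by
  rw [pvStep]
  rw [PySem.Set.mem_update]
  rw [pv_mem_foldl _ _
      (fun (q : Int × Int) (p : Int × Int) => ∃ d ∈ pvDeltas,
        pvInB rows cols (q.1 + d.1, q.2 + d.2) ∧ p = (q.1 + d.1, q.2 + d.2))
      (fun ns q p => by
        rw [pv_mem_foldl _ _
          (fun (d : Int × Int) (p : Int × Int) =>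
            pvInB rows cols (q.1 + d.1, q.2 + d.2) ∧ p = (q.1 + d.1, q.2 + d.2))
          (fun ns d p => pv_mem_add_if _ _ _ _) ns p]
        rfl)]
  simp [PySem.Set.empty, pvDeltas]

-- Sources lie inside the grid (uses Pre_) -----------------------------------

theorem pv_src_inB (grid : List (List String)) (n : Int) (hpre : Pre_deadly_virus grid n)
    (s : Int × Int) (hs : s ∈ pvSources grid) :
    pvInB (grid.length : Int) ((grid.headD []).length : Int) s := by
  rw [pv_mem_sources] at hs
  obtain ⟨rr, hrr, cv, hcv, hV, hps⟩ := hs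
  rw [PySem.List.mem_enumerate_iff] at hrr
  obtain ⟨k, hk, rfl⟩ := hrr
  have hrow : grid[k] ∈ grid := List.getElem_mem hk
  have hcols := hpre.2 grid[k] hrow cv hcv hV
  rw [PySem.List.mem_enumerate_iff] at hcv
  obtain ⟨j, hj, hcj⟩ := hcv
  subst hps
  rw [hcj] at hcols ⊢
  refine ⟨?_, ?_, ?_, ?_⟩ <;> dsimp <;> omega

-- Characterisation of the set after k steps ---------------------------------

theorem pv_mem_iter (grid : List (List String)) (n : Int) (hpre : Pre_deadly_virus grid n)
    (k : Nat) (p : Int × Int) :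
    p ∈ (pvStep (grid.length : Int) ((grid.headD []).length : Int))^[k] (pvV0 grid) ↔
      ∃ s ∈ pvSources grid,
        pvInB (grid.length : Int) ((grid.headD []).length : Int) p ∧ pvDist p s ≤ (k : Int) := by
  induction k generalizing p with
  | zero =>
    rw [Function.iterate_zero, id, pv_mem_v0]
    constructor
    · intro hp
      exact ⟨p, hp, pv_src_inB grid n hpre p hp, by simp [pvDist]⟩
    · rintro ⟨s, hs, _, hd⟩
      simp only [pvDist] at hd
      have h1 : p.1 = s.1 ∧ p.2 = s.2 := by omega
      have hps : p = s := Prod.ext h1.1 h1.2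
      rwa [hps]
  | succ k ih =>
    rw [Function.iterate_succ_apply', pv_mem_step]
    constructor
    · rintro (hp | ⟨q, hq, d, hd, hb, rfl⟩)
      · obtain ⟨s, hs, hb, hdist⟩ := (ih p).mp hp
        refine ⟨s, hs, hb, ?_⟩
        simp only [pvDist] at hdist ⊢
        omega
      · obtain ⟨s, hs, _, hdist⟩ := (ih q).mp hq
        refine ⟨s, hs, hb, ?_⟩
        rw [pvDeltas] at hd
        fin_cases hd <;>
          (simp only [pvDist] at hdist ⊢; omega)
    · rintro ⟨s, hs, hb, hdist⟩
      by_cases hk : pvDist p s ≤ (k : Int)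
      · exact .inl ((ih p).mpr ⟨s, hs, hb, hk⟩)
      · right
        have hsb := pv_src_inB grid n hpre s hs
        obtain ⟨hb1, hb2, hb3, hb4⟩ := hb
        obtain ⟨hs1, hs2, hs3, hs4⟩ := hsb
        simp only [pvDist] at hdist hk
        rcases lt_trichotomy p.1 s.1 with h1 | h1 | h1
        · refine ⟨(p.1 + 1, p.2), (ih _).mpr ⟨s, hs, ⟨by dsimp; omega, by dsimp; omega,
              by dsimp; omega, by dsimp; omega⟩, by simp only [pvDist]; omega⟩,
            (-1, 0), by simp [pvDeltas], ⟨by dsimp; omega, by dsimp; omega, by dsimp; omega,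
              by dsimp; omega⟩, by dsimp; exact Prod.ext (by omega) (by omega)⟩
        · rcases lt_trichotomy p.2 s.2 with h2 | h2 | h2
          · refine ⟨(p.1, p.2 + 1), (ih _).mpr ⟨s, hs, ⟨by dsimp; omega, by dsimp; omega,
                by dsimp; omega, by dsimp; omega⟩, by simp only [pvDist]; omega⟩,
              (0, -1), by simp [pvDeltas], ⟨by dsimp; omega, by dsimp; omega, by dsimp; omega,
                by dsimp; omega⟩, by dsimp; exact Prod.ext (by omega) (by omega)⟩
          · exact absurd (by omega) hk
          · refine ⟨(p.1, p.2 - 1), (ih _).mpr ⟨s, hs, ⟨by dsimp; omega, by dsimp; omega,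
                by dsimp; omega, by dsimp; omega⟩, by simp only [pvDist]; omega⟩,
              (0, 1), by simp [pvDeltas], ⟨by dsimp; omega, by dsimp; omega, by dsimp; omega,
                by dsimp; omega⟩, by dsimp; exact Prod.ext (by omega) (by omega)⟩
        · refine ⟨(p.1 - 1, p.2), (ih _).mpr ⟨s, hs, ⟨by dsimp; omega, by dsimp; omega,
              by dsimp; omega, by dsimp; omega⟩, by simp only [pvDist]; omega⟩,
            (1, 0), by simp [pvDeltas], ⟨by dsimp; omega, by dsimp; omega, by dsimp; omega,
              by dsimp; omega⟩, by dsimp; exact Prod.ext (by omega) (by omega)⟩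

-- A foldl that ignores the list elements is an iterate ----------------------

theorem pv_foldl_const {a b : Type} (l : List b) (F : a → a) (v : a) :
    l.foldl (fun v _ => F v) v = F^[l.length] v := by
  induction l generalizing v with
  | nil => rfl
  | cons x l ih => simp [List.foldl_cons, ih, Function.iterate_succ_apply]

-- The write-out loop --------------------------------------------------------

theorem pv_getD_set (res : List (List String)) (i r : Nat) (x : List String) :
    (res.set i x).getD r [] = if i = r ∧ i < res.length then x else res.getD r [] := by
  simp only [List.getD_eq_getElem?_getD, List.getElem?_set]
  split_ifs <;> simp_all <;> omega

theorem pv_getD_set_str (l : List String) (i c : Nat) (x : String) :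
    (l.set i x).getD c "" = if i = c ∧ i < l.length then x else l.getD c "" := by
  simp only [List.getD_eq_getElem?_getD, List.getElem?_set]
  split_ifs <;> simp_all <;> omega

theorem pv_length_write (res : List (List String)) (p : Int × Int) (h : 0 ≤ p.1) :
    (pvWrite res p).length = res.length := by
  rw [pvWrite, PySem.List.pySetD_of_nonneg _ _ h, List.length_set]

theorem pv_rowlen_write (res : List (List String)) (p : Int × Int) (h1 : 0 ≤ p.1) (h2 : 0 ≤ p.2)
    (r : Nat) : ((pvWrite res p).getD r []).length = (res.getD r []).length := by
  rw [pvWrite, PySem.List.pySetD_of_nonneg _ _ h1, PySem.List.pySetD_of_nonneg _ _ h2,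
    PySem.List.pyGetD_of_nonneg _ _ h1, pv_getD_set]
  split_ifs with h
  · rw [List.length_set, h.1]
  · rfl

theorem pv_cell_write (res : List (List String)) (p : Int × Int)
    (hp1 : 0 ≤ p.1) (hp2 : 0 ≤ p.2) (hp3 : p.1 < (res.length : Int))
    (hp4 : p.2 < (((res.getD p.1.toNat []).length : Int)))
    (r c : Nat) :
    pvCellD (pvWrite res p) r c =
      if p = ((r : Int), (c : Int)) then "V" else pvCellD res r c := by
  have hlt1 : p.1.toNat < res.length := by omega
  have hlt2 : p.2.toNat < (res.getD p.1.toNat []).length := by omega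
  rw [pvCellD, pvCellD, pvWrite, PySem.List.pySetD_of_nonneg _ _ hp1,
    PySem.List.pySetD_of_nonneg _ _ hp2, PySem.List.pyGetD_of_nonneg _ _ hp1, pv_getD_set]
  by_cases hr : p.1.toNat = r
  · rw [if_pos ⟨hr, hlt1⟩, pv_getD_set_str]
    by_cases hc : p.2.toNat = c
    · have hpe : p = ((r : Int), (c : Int)) := Prod.ext (by omega) (by omega)
      rw [if_pos ⟨hc, hlt2⟩, if_pos hpe]
    · have hpe : p ≠ ((r : Int), (c : Int)) := by
        intro h
        exact hc (by rw [h]; simp)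
      rw [if_neg (fun h => hc h.1), if_neg hpe, hr]
  · have hpe : p ≠ ((r : Int), (c : Int)) := by
      intro h
      exact hr (by rw [h]; simp)
    rw [if_neg (fun h => hr h.1), if_neg hpe]

theorem pv_cell_write_fold (C : Nat) (S : List (Int × Int)) (res : List (List String))
    (hrow : ∀ r : Nat, r < res.length → (res.getD r []).length = C)
    (hS : ∀ p ∈ S, -1 < p.1 ∧ p.1 < (res.length : Int) ∧ -1 < p.2 ∧ p.2 < (C : Int))
    (r c : Nat) :
    pvCellD (S.foldl pvWrite res) r c =
      if ((r : Int), (c : Int)) ∈ S then "V" else pvCellD res r c := by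
  induction S generalizing res with
  | nil => simp
  | cons p S ih =>
    obtain ⟨h1, h2, h3, h4⟩ := hS p (by simp)
    have hnn1 : (0:Int) ≤ p.1 := by omega
    have hnn2 : (0:Int) ≤ p.2 := by omega
    have hlt : p.1.toNat < res.length := by omega
    rw [List.foldl_cons, ih (pvWrite res p)
      (fun r hr => by
        rw [pv_rowlen_write res p hnn1 hnn2]
        exact hrow r (by rwa [pv_length_write res p hnn1] at hr))
      (fun q hq => by
        rw [pv_length_write res p hnn1]
        exact hS q (by simp [hq]))]
    rw [pv_cell_write res p hnn1 hnn2 h2 (by rw [hrow p.1.toNat hlt]; exact h4)]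
    by_cases hmem : ((r : Int), (c : Int)) ∈ S
    · simp [hmem]
    · by_cases hpe : p = ((r : Int), (c : Int))
      · simp [hmem, hpe]
      · simp [hmem, hpe, Ne.symm hpe]

theorem pv_length_write_fold (S : List (Int × Int)) (res : List (List String))
    (hS : ∀ p ∈ S, 0 ≤ p.1) : (S.foldl pvWrite res).length = res.length := by
  induction S generalizing res with
  | nil => rfl
  | cons p S ih =>
    rw [List.foldl_cons, ih _ (fun q hq => hS q (List.mem_cons_of_mem _ hq)),
      pv_length_write res p (hS p List.mem_cons_self)]

theorem pv_rowlen_write_fold (S : List (Int × Int)) (res : List (List String))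
    (hS : ∀ p ∈ S, 0 ≤ p.1 ∧ 0 ≤ p.2) (r : Nat) :
    ((S.foldl pvWrite res).getD r []).length = (res.getD r []).length := by
  induction S generalizing res with
  | nil => rfl
  | cons p S ih =>
    rw [List.foldl_cons, ih _ (fun q hq => hS q (List.mem_cons_of_mem _ hq)),
      pv_rowlen_write res p (hS p List.mem_cons_self).1 (hS p List.mem_cons_self).2]

-- ===== VERDICT (by name: the statement is the Claim_ definition above) =====
theorem deadly_virus_spec : Claim_equal_deadly_virus := by
  intro grid n _ hpre
  unfold Spec_deadly_virus
  have hg0 : PySem.List.pyGetD grid 0 [] = grid.headD [] := by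
    cases grid <;> simp [PySem.List.pyGetD, PySem.List.pyGet?, PySem.List.pyIdx?]
  have habs : ∀ x : Int, |x| = (x.natAbs : Int) := fun x => Int.abs_eq_natAbs x
  have hmax : ((n.toNat : Nat) : Int) = max n 0 := Int.ofNat_toNat n
  -- canonical form of port A
  have hA : deadly_virus grid n =
      List.foldl pvWrite
        (List.replicate grid.length (List.replicate (grid.headD []).length "P"))
        ((pvStep (grid.length : Int) ((grid.headD []).length : Int))^[n.toNat] (pvV0 grid)) := by
    change List.foldl pvWrite
        (List.replicate ((grid.length : Int)).toNat
          (List.replicate (((PySem.List.pyGetD grid 0 []).length : Int)).toNat "P"))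
        ((PySem.List.pyRange 0 n 1).foldl
          (fun vs _ => pvStep (grid.length : Int) ((PySem.List.pyGetD grid 0 []).length : Int) vs)
          (pvV0 grid)) = _
    rw [pv_foldl_const, PySem.List.length_pyRange_one, hg0]
    norm_num
  -- canonical form of port B
  have hB : deadly_virus_alt grid n =
      (PySem.List.pyRange 0 (grid.length : Int) 1).map (fun r =>
        (PySem.List.pyRange 0 ((grid.headD []).length : Int) 1).map (fun c =>
          if (pvSources grid).any (fun s => decide (|r - s.1| + |c - s.2| ≤ max n 0))
          then "V" else "P")) := by
    rw [deadly_virus_alt, hg0]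
  rw [hA, hB]
  -- abbreviations
  have hSin : ∀ p ∈ (pvStep (grid.length : Int) ((grid.headD []).length : Int))^[n.toNat] (pvV0 grid),
      -1 < p.1 ∧ p.1 < (grid.length : Int) ∧ -1 < p.2 ∧ p.2 < ((grid.headD []).length : Int) := by
    intro p hp
    exact ((pv_mem_iter grid n hpre n.toNat p).mp hp).choose_spec.2.1
  have hrow0 : ∀ r : Nat, r < (List.replicate grid.length
      (List.replicate (grid.headD []).length "P")).length →
      ((List.replicate grid.length (List.replicate (grid.headD []).length "P")).getD r []).length
        = (grid.headD []).length := by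
    intro r hr
    rw [List.length_replicate] at hr
    simp [List.getD_eq_getElem?_getD, List.getElem?_replicate, hr]
  have hflen : (List.foldl pvWrite
      (List.replicate grid.length (List.replicate (grid.headD []).length "P"))
      ((pvStep (grid.length : Int) ((grid.headD []).length : Int))^[n.toNat] (pvV0 grid))).length
        = grid.length := by
    rw [pv_length_write_fold _ _ (fun p hp => by have := hSin p hp; omega), List.length_replicate]
  apply List.ext_getElem
  · rw [hflen, List.length_map, PySem.List.length_pyRange_one]
    omega
  intro i h1 h2
  have hiR : i < grid.length := by rwa [hflen] at h1
  have hrowl : ((List.foldl pvWrite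
      (List.replicate grid.length (List.replicate (grid.headD []).length "P"))
      ((pvStep (grid.length : Int) ((grid.headD []).length : Int))^[n.toNat] (pvV0 grid))).getD i []).length
        = (grid.headD []).length := by
    rw [pv_rowlen_write_fold _ _ (fun p hp => by have := hSin p hp; omega)]
    exact hrow0 i (by simpa using hiR)
  rw [List.getElem_map, PySem.List.getElem_pyRange_one]
  apply List.ext_getElem
  · rw [← List.getD_eq_getElem _ [] h1, hrowl, List.length_map, PySem.List.length_pyRange_one]
    omega
  intro j h3 h4
  have hjC : j < (grid.headD []).length := by
    rw [← List.getD_eq_getElem _ [] h1, hrowl] at h3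
    exact h3
  rw [List.getElem_map, PySem.List.getElem_pyRange_one]
  have hcellL : (List.foldl pvWrite
      (List.replicate grid.length (List.replicate (grid.headD []).length "P"))
      ((pvStep (grid.length : Int) ((grid.headD []).length : Int))^[n.toNat] (pvV0 grid)))[i][j] =
      pvCellD (List.foldl pvWrite
        (List.replicate grid.length (List.replicate (grid.headD []).length "P"))
        ((pvStep (grid.length : Int) ((grid.headD []).length : Int))^[n.toNat] (pvV0 grid))) i j := by
    rw [pvCellD, List.getD_eq_getElem _ [] h1, List.getD_eq_getElem]
  rw [hcellL, pv_cell_write_fold (grid.headD []).length _ _ hrow0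
    (fun p hp => by
      have := hSin p hp
      simp only [List.length_replicate]
      exact this)]
  have hcond : (((i : Int), (j : Int)) ∈
      (pvStep (grid.length : Int) ((grid.headD []).length : Int))^[n.toNat] (pvV0 grid)) ↔
      ((pvSources grid).any
        (fun s => decide (|0 + (i : Int) - s.1| + |0 + (j : Int) - s.2| ≤ max n 0)) = true) := by
    rw [pv_mem_iter grid n hpre, List.any_eq_true]
    constructor
    · rintro ⟨s, hs, _, hd⟩
      refine ⟨s, hs, decide_eq_true ?_⟩
      simp only [pvDist] at hd
      rw [habs, habs, ← hmax]
      omega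
    · rintro ⟨s, hs, hd⟩
      rw [decide_eq_true_iff, habs, habs, ← hmax] at hd
      refine ⟨s, hs, ⟨by omega, by omega, by omega, by omega⟩, ?_⟩
      simp only [pvDist]
      omega
  by_cases hm : ((i : Int), (j : Int)) ∈
      (pvStep (grid.length : Int) ((grid.headD []).length : Int))^[n.toNat] (pvV0 grid)
  · rw [if_pos hm, if_pos (hcond.mp hm)]
  · rw [if_neg hm, if_neg (fun h => hm (hcond.mpr h))]
    have hjC' : j < (grid.head?.getD []).length := by simpa using hjC
    rw [pvCellD]
    simp [List.getD_eq_getElem?_getD, List.getElem?_replicate, hiR, hjC']
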